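-- pv_equiv track=rewrite | github.com/addi-G998/Factorial-clock-In-Extractor | scrape.py | filterTwo
-- ===== SOURCE A (Python) =====
-- def filterTwo(filteredDates):
--     result = []
--     prevElement = None
--     for date in filteredDates:
--
--         if date == 'Arbeit' and prevElement == 'Arbeit':
--             continue
--         singleDigit(date)
--         result.append(singleDigit(date))
--         prevElement = date
--     return result
--
-- def singleDigit(date):
--     dateSplit = date.split(' ')
--     if(len(dateSplit[0])== 1):
--         dateSplit[0] = '0' + dateSplit[0]
--         newDate = ' '.join(dateSplit)
--         return newDate
--
--     else:
--         return date
-- ===== SOURCE B (Python) =====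
-- def filterTwo(filteredDates):
--     result = []
--     i = 0
--     n = len(filteredDates)
--     while i < n:
--         v = filteredDates[i]
--         k = 1
--         while i + k < n and filteredDates[i + k] == v:
--             k += 1
--         if v == 'Arbeit':
--             result.append(singleDigit(v))
--         else:
--             result += [singleDigit(v)] * k
--         i += k
--     return result
--
-- def singleDigit(date):
--     dateSplit = date.split(' ')
--     if(len(dateSplit[0])== 1):
--         dateSplit[0] = '0' + dateSplit[0]
--         newDate = ' '.join(dateSplit)
--         return newDate
--
--     else:
--         return date
-- ===== Notes on version B (the rewrite author's own statement) =====
-- stated objective: alternative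
-- what changed: B walks the list run by run (counting each maximal block of equal consecutive elements by index, emitting it once for 'Arbeit' runs and k times otherwise) instead of A's per-element loop with a prevElement sentinel.
import Mathlib
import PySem

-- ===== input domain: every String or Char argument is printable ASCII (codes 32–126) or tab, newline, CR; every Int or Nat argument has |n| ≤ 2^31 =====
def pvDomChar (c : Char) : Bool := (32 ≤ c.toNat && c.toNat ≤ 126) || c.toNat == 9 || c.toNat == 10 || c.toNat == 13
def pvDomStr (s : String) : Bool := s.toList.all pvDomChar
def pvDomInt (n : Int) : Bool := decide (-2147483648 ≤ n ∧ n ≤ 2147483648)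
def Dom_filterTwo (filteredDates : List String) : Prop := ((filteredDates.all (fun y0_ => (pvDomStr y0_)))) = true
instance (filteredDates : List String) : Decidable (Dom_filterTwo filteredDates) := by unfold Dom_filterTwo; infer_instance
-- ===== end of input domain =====

-- B walks the list run by run (maximal blocks of equal consecutive elements) instead of A's
-- per-element loop with a prevElement sentinel; an 'alternative' decomposition of the same cost.

-- ===== PORT A =====
-- shared helper: Python's singleDigit (identical in Source A and Source B)
def singleDigit (date : String) : String :=
  let dateSplit := (PySem.Chars.splitOn date.toList " ".toList).map String.ofList
  if PySem.Str.len (dateSplit.headD "") = 1 then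
    PySem.Str.join " " (("0" ++ dateSplit.headD "") :: dateSplit.tail)
  else date

def filterTwoLoop (l : List String) (result : List String) (prevElement : Option String) : List String :=
  match l with
  | [] => result
  | date :: rest =>
    if date = "Arbeit" ∧ prevElement = some "Arbeit" then
      filterTwoLoop rest result prevElement
    else
      filterTwoLoop rest (result ++ [singleDigit date]) (some date)

def filterTwo (filteredDates : List String) : List String :=
  filterTwoLoop filteredDates [] none

-- ===== PORT B =====
-- Source B's inner 'while k < len(rest) and rest[k] == v' counter (run length in the tail)
def runLen (v : String) : List String → Nat
  | [] => 0
  | x :: xs => if x = v then runLen v xs + 1 else 0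

def filterTwo_alt : List String → List String
  | [] => []
  | v :: rest =>
    let k := 1 + runLen v rest
    (if v = "Arbeit" then [singleDigit v] else List.replicate k (singleDigit v)) ++
      filterTwo_alt (rest.drop (runLen v rest))
  termination_by l => l.length
  decreasing_by simp

-- ===== PRECONDITION & SPEC =====
def Spec_filterTwo (filteredDates : List String) (out : List String) : Prop := out = filterTwo_alt filteredDates
instance (filteredDates : List String) (out : List String) : Decidable (Spec_filterTwo filteredDates out) := by unfold Spec_filterTwo; infer_instance

-- ===== CLAIM (what is proved, stated in full; the proofs are below) =====
def Claim_equal_filterTwo : Prop := ∀ (filteredDates : List String), Dom_filterTwo filteredDates → Spec_filterTwo filteredDates (filterTwo filteredDates)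

-- ===== LEMMAS AND PROOFS =====

theorem alt_nil : filterTwo_alt [] = [] := by simp [filterTwo_alt]

theorem alt_cons (v : String) (rest : List String) :
    filterTwo_alt (v :: rest) =
      (if v = "Arbeit" then [singleDigit v]
       else List.replicate (1 + runLen v rest) (singleDigit v)) ++
        filterTwo_alt (rest.drop (runLen v rest)) := by
  simp [filterTwo_alt]

-- the common element-wise spec both ports are reduced to
def gSpec : List String → Option String → List String
  | [], _ => []
  | d :: rest, prev =>
    if d = "Arbeit" ∧ prev = some "Arbeit" then gSpec rest prev
    else singleDigit d :: gSpec rest (some d)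

theorem filterTwoLoop_eq_gSpec (l : List String) :
    ∀ result prev, filterTwoLoop l result prev = result ++ gSpec l prev := by
  induction l with
  | nil => intro result prev; simp [filterTwoLoop, gSpec]
  | cons d rest ih =>
    intro result prev
    by_cases h : d = "Arbeit" ∧ prev = some "Arbeit"
    · simp [filterTwoLoop, gSpec, h, ih]
    · simp [filterTwoLoop, gSpec, h, ih]

theorem gSpec_drop_arbeit (rest : List String) :
    gSpec rest (some "Arbeit") = gSpec (rest.drop (runLen "Arbeit" rest)) (some "Arbeit") := by
  induction rest with
  | nil => rfl
  | cons x xs ih =>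
    by_cases hx : x = "Arbeit"
    · subst hx; simp [gSpec, runLen, ih]
    · simp [runLen, hx]

theorem gSpec_run_other (v : String) (hv : v ≠ "Arbeit") (rest : List String) :
    gSpec rest (some v) =
      List.replicate (runLen v rest) (singleDigit v) ++ gSpec (rest.drop (runLen v rest)) (some v) := by
  induction rest with
  | nil => rfl
  | cons x xs ih =>
    by_cases hx : x = v
    · subst hx
      simp only [runLen, gSpec]
      rw [if_neg (by simp [hv])]
      simp [List.replicate_succ, ih]
    · simp [runLen, hx]

theorem head?_drop_runLen (v : String) (l : List String) :
    ∀ h, (l.drop (runLen v l)).head? = some h → h ≠ v := by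
  induction l with
  | nil => intro h hh; simp at hh
  | cons x xs ih =>
    intro h hh
    by_cases hx : x = v
    · subst hx
      simp only [runLen] at hh
      exact ih h hh
    · simp [runLen, hx] at hh
      subst hh; exact hx

theorem gSpec_eq_alt : ∀ (n : Nat) (l : List String) (prev : Option String),
    l.length ≤ n →
    (∀ h, l.head? = some h → h = "Arbeit" → prev ≠ some "Arbeit") →
    gSpec l prev = filterTwo_alt l := by
  intro n
  induction n with
  | zero =>
    intro l prev hlen _
    have : l = [] := List.length_eq_zero_iff.mp (Nat.le_zero.mp hlen)
    subst this; rw [alt_nil]; rfl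
  | succ n ih =>
    intro l prev hlen hcond
    match l with
    | [] => rw [alt_nil]; rfl
    | v :: rest =>
      have hskip : ¬ (v = "Arbeit" ∧ prev = some "Arbeit") := by
        rintro ⟨hv, hp⟩
        exact hcond v rfl hv hp
      rw [gSpec, if_neg hskip]
      by_cases hv : v = "Arbeit"
      · subst hv
        rw [gSpec_drop_arbeit rest]
        rw [ih (rest.drop (runLen "Arbeit" rest)) (some "Arbeit")
            (by simp at hlen ⊢; omega)
            (by intro h hh hA
                exact absurd hA (head?_drop_runLen "Arbeit" rest h hh))]
        rw [alt_cons]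
        simp
      · rw [gSpec_run_other v hv rest]
        rw [ih (rest.drop (runLen v rest)) (some v)
            (by simp at hlen ⊢; omega)
            (by intro h _ _ hp
                exact hv (by injection hp))]
        rw [alt_cons]
        rw [if_neg hv, Nat.add_comm 1 (runLen v rest), List.replicate_succ, List.cons_append]

-- ===== VERDICT (by name: the statement is the Claim_ definition above) =====
theorem filterTwo_spec : Claim_equal_filterTwo := by
  intro l _
  unfold Spec_filterTwo filterTwo
  rw [filterTwoLoop_eq_gSpec]
  simp only [List.nil_append]
  exact gSpec_eq_alt l.length l none le_rfl (by intro h _ _ hp; cases hp)
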